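-- pv_equiv track=rewrite | github.com/tychen5/ProductNameIdentification | api/v1.1/app/api/product_line_inference.py | intersect_loop
-- ===== SOURCE A (Python) =====
-- def get_intersection(li1, li2, default_order=False):
--     """
--     Get the intersection of two lists while maintaining the order of the first list.
--
--     Args:
--         li1: First list.
--         li2: Second list.
--         default_order: If True, use the default order.
--
--     Returns:
--         list: Intersection of the two lists.
--     """
--     return sorted(set(li1) & set(li2), key=li1.index)
--
-- def intersect_loop(li):
--     """
--     Get the intersection of a list of lists.
--
--     Args:
--         li: List of lists.
--
--     Returns:
--         list: Intersection of the lists.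
--     """
--     key = li[0]
--
--     for l in li[1:]:
--         intersect_li = get_intersection(key, l)
--
--         if len(intersect_li) > 0:
--             return intersect_li
--         else:
--             continue
--
--     return []
-- ===== SOURCE B (Python) =====
-- def intersect_loop(li):
--     # one ordered pass per list: dedup li[0] once, then filter by set membership;
--     # no set-intersection object and no sort/li.index calls.
--     keyu = list(dict.fromkeys(li[0]))
--     for l in li[1:]:
--         s = set(l)
--         r = [x for x in keyu if x in s]
--         if r:
--             return r
--     return []
-- ===== Notes on version B (the rewrite author's own statement) =====
-- stated objective: simpler
-- what changed: Replaces the per-list set-intersection-then-sort-by-li[0].index (repeated list.index scans inside the sort key) with a one-time ordered dedup of li[0] and, per list, a single membership-filter pass over it; no sorting and no index scans remain.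
import Mathlib
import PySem

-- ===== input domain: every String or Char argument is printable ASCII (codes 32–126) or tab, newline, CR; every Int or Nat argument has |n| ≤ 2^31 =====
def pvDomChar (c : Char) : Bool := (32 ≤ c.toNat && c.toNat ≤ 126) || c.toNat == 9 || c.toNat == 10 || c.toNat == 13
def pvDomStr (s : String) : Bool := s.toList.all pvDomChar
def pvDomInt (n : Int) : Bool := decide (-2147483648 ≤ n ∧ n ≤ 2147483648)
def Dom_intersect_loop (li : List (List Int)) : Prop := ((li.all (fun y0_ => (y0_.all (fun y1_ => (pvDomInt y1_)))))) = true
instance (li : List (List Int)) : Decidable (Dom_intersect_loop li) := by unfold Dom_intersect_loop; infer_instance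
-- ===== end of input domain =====

-- B replaces A's per-list set-intersection + sort by li[0].index with one ordered
-- dedup of li[0] and a single membership-filter pass per list (objective: simpler).

-- ===== PORT A =====
-- sorted(set(li1) & set(li2), key=li1.index); key li1.index is total here (every
-- intersection element is in li1), ported as index? with getD 0 (never hit).
def get_intersection (li1 li2 : List Int) (_default_order : Bool) : List Int :=
  PySem.List.sorted (PySem.Set.inter (PySem.Set.ofList li1) (PySem.Set.ofList li2))
    (fun x => (PySem.List.index? li1 x).getD 0) false

-- the 'for l in li[1:]' loop with early return
def intersect_loop_go (key : List Int) : List (List Int) → List Int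
  | [] => []
  | l :: rest =>
    let intersect_li := get_intersection key l false
    if intersect_li.length > 0 then intersect_li else intersect_loop_go key rest

def intersect_loop (li : List (List Int)) : List Int :=
  match PySem.List.pyGet? li 0 with
  | none => []  -- IndexError on empty li; excluded by Pre_
  | some key => intersect_loop_go key (PySem.List.slice li (some 1) none)

-- ===== PORT B =====
-- the 'for l in li[1:]' loop of Source B over the precomputed deduped key
def intersect_loop_alt_go (keyu : List Int) : List (List Int) → List Int
  | [] => []
  | l :: rest =>
    let s := PySem.Set.ofList l
    let r := keyu.filter (fun x => PySem.Set.contains s x)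
    if !r.isEmpty then r else intersect_loop_alt_go keyu rest

def intersect_loop_alt (li : List (List Int)) : List Int :=
  match PySem.List.pyGet? li 0 with
  | none => []  -- IndexError on empty li; excluded by Pre_
  | some key => intersect_loop_alt_go (PySem.List.dedup key) (li.tail)

-- ===== PRECONDITION & SPEC =====
-- Pre_ excludes only the empty list, on which A (li[0]) raises IndexError.
def Pre_intersect_loop (li : List (List Int)) : Prop := li ≠ []
instance (li : List (List Int)) : Decidable (Pre_intersect_loop li) := by unfold Pre_intersect_loop; infer_instance
def pvWitness_intersect_loop : List (List Int) := [[1, 2, 1], [2, 3]]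

def Spec_intersect_loop (li : List (List Int)) (out : List Int) : Prop := out = intersect_loop_alt li
instance (li : List (List Int)) (out : List Int) : Decidable (Spec_intersect_loop li out) := by unfold Spec_intersect_loop; infer_instance

-- ===== CLAIM (what is proved, stated in full; the proofs are below) =====
def Claim_equal_intersect_loop : Prop := ∀ (li : List (List Int)), Dom_intersect_loop li → Pre_intersect_loop li → Spec_intersect_loop li (intersect_loop li)

-- ===== LEMMAS AND PROOFS =====

-- index in (x :: xs) of an element other than x is one more than its index in xs
theorem idx_cons_lt {x a b : Int} {xs : List Int} (ha : a ≠ x) (hb : b ≠ x)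
    (hma : a ∈ xs) (hmb : b ∈ xs)
    (h : (PySem.List.index? xs a).getD 0 < (PySem.List.index? xs b).getD 0) :
    (PySem.List.index? (x :: xs) a).getD 0 < (PySem.List.index? (x :: xs) b).getD 0 := by
  rw [PySem.List.index?_cons_of_ne _ (Ne.symm ha), PySem.List.index?_cons_of_ne _ (Ne.symm hb)]
  cases hia : PySem.List.index? xs a with
  | none => exact absurd ((PySem.List.index?_eq_none_iff _ _).1 hia) (by simpa using hma)
  | some ka =>
    cases hib : PySem.List.index? xs b with
    | none => exact absurd ((PySem.List.index?_eq_none_iff _ _).1 hib) (by simpa using hmb)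
    | some kb =>
      simp only [hia, hib] at h ⊢
      simpa using Nat.succ_lt_succ h

-- set(xs) is strictly increasing under xs.index
theorem ofList_pairwise_idx (xs : List Int) :
    (PySem.Set.ofList xs).Pairwise
      (fun a b => (PySem.List.index? xs a).getD 0 < (PySem.List.index? xs b).getD 0) := by
  induction xs with
  | nil => simp [PySem.Set.ofList_nil]
  | cons x xs ih =>
    rw [PySem.Set.ofList_cons]
    constructor
    · intro b hb
      have hbx : b ∈ PySem.Set.ofList xs ∧ b ≠ x := (PySem.Set.mem_discard _ _ _).1 hb
      have hbm : b ∈ xs := (PySem.Set.mem_ofList _ _).1 hbx.1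
      rw [PySem.List.index?_cons_self, PySem.List.index?_cons_of_ne _ (Ne.symm hbx.2)]
      cases hib : PySem.List.index? xs b with
      | none => exact absurd hbm ((PySem.List.index?_eq_none_iff _ _).1 hib)
      | some kb => simp
    · have hsub : (PySem.Set.discard (PySem.Set.ofList xs) x).Sublist (PySem.Set.ofList xs) := by
        simp [PySem.Set.discard]
      refine ((ih.sublist hsub)).imp_of_mem ?_
      intro a b ha hb h
      have ha' := (PySem.Set.mem_discard _ _ _).1 ha
      have hb' := (PySem.Set.mem_discard _ _ _).1 hb
      exact idx_cons_lt ha'.2 hb'.2 ((PySem.Set.mem_ofList _ _).1 ha'.1) ((PySem.Set.mem_ofList _ _).1 hb'.1) h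

-- A's per-pair intersection equals B's filtered dedup pass
theorem get_intersection_eq (li1 li2 : List Int) :
    get_intersection li1 li2 false =
      (PySem.List.dedup li1).filter (fun x => PySem.Set.contains (PySem.Set.ofList li2) x) := by
  unfold get_intersection
  have hinter : PySem.Set.inter (PySem.Set.ofList li1) (PySem.Set.ofList li2) =
      (PySem.Set.ofList li1).filter (fun x => PySem.Set.contains (PySem.Set.ofList li2) x) := rfl
  rw [hinter, PySem.List.dedup_eq_ofList]
  exact PySem.List.sorted_eq_self_of_pairwise _ _
    (((ofList_pairwise_idx li1).sublist List.filter_sublist).imp Nat.le_of_lt)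

-- the two loops agree
theorem go_eq (key : List Int) (rest : List (List Int)) :
    intersect_loop_go key rest = intersect_loop_alt_go (PySem.List.dedup key) rest := by
  induction rest with
  | nil => rfl
  | cons l rest ih =>
    simp only [intersect_loop_go, intersect_loop_alt_go, get_intersection_eq, ih]
    rcases h : (PySem.List.dedup key).filter (fun x => PySem.Set.contains (PySem.Set.ofList l) x) with _ | _ <;> simp

-- ===== VERDICT (by name: the statement is the Claim_ definition above) =====
theorem intersect_loop_spec : Claim_equal_intersect_loop := by
  intro li _ hpre
  unfold Spec_intersect_loop intersect_loop intersect_loop_alt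
  cases li with
  | nil => exact absurd rfl hpre
  | cons key rest =>
    rw [PySem.List.slice_from_one]
    simp [PySem.List.pyGet?, PySem.List.pyIdx?]
    exact go_eq key rest
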